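-- pv_equiv track=rewrite | github.com/Sendil239/lens | lens_backend/solr_search.py | getCountryTweetCount
-- ===== SOURCE A (Python) =====
-- def getCountryTweetCount(payload, tweet_list, country_set):
--
--     temp_country_set = set()
--     if len(payload['countries']) > 0:
--         for country in payload['countries']:
--             temp_country_set.add(country)
--     else:
--         temp_country_set = country_set.copy()
--     country_tweet_count = {}
--     for country in temp_country_set:
--         country_tweet_count[country] = 0
--
--     for tweet in tweet_list:
--         country_name = tweet['country']
--         if country_name in temp_country_set:
--             country_tweet_count[country_name] += 1
--
--     return country_tweet_count
-- ===== SOURCE B (Python) =====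
-- # B: extract every tweet's country into a list once, then answer each wanted
-- # country by counting its occurrences in that list with list.count (no counting
-- # dict and no per-tweet membership test; per-country scans instead).
-- def getCountryTweetCount(payload, tweet_list, country_set):
--     names = [tweet['country'] for tweet in tweet_list]
--     wanted = set(payload['countries']) or set(country_set)
--     return {c: names.count(c) for c in wanted}
-- ===== Notes on version B (the rewrite author's own statement) =====
-- stated objective: alternative
-- what changed: A zero-seeds a dict over the wanted set and does one membership-filtered increment pass over the tweets; B keeps no counting dict at all: it materialises the list of tweet countries once and answers each wanted country with a separate list.count scan over that list.
import Mathlib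
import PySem

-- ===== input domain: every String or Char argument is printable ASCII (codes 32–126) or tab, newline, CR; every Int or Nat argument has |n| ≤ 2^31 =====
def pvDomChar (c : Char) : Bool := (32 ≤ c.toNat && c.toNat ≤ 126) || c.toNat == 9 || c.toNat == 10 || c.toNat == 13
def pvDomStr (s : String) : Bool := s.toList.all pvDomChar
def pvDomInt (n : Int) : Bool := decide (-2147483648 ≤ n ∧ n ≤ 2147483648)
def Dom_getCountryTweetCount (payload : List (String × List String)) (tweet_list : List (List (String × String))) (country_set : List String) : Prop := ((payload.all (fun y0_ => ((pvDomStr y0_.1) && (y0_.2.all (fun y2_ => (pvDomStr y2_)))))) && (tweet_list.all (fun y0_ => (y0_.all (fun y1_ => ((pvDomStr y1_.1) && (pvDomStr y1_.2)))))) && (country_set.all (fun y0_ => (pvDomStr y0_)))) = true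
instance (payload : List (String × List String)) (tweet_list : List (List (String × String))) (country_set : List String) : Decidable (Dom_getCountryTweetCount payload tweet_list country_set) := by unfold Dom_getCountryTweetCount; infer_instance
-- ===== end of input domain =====

-- One line: B drops A's counting dict entirely — it extracts the tweet-country list once and
-- answers each wanted country by a separate list.count scan (alternative algorithm, same results).
-- Equality proved on all inputs where the Python A returns (Pre_ = required keys present).

-- ===== PORT A =====
def getCountryTweetCount (payload : List (String × List String)) (tweet_list : List (List (String × String))) (country_set : List String) : List (String × Int) :=
  -- temp_country_set = set();  if len(payload['countries']) > 0: add each;  else: country_set.copy()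
  let countries : List String := ((PySem.Dict.mk payload).get? "countries").getD []
  let temp : PySem.Set String :=
    if countries.length > 0 then countries.foldl PySem.Set.add PySem.Set.empty
    else PySem.Set.ofList country_set
  -- country_tweet_count = {};  for country in temp: country_tweet_count[country] = 0
  let d0 : PySem.Dict String Int := temp.foldl (fun d c => d.insert c 0) PySem.Dict.empty
  -- for tweet in tweet_list: name = tweet['country']; if name in temp: d[name] += 1
  let d : PySem.Dict String Int := tweet_list.foldl (fun d t =>
      let name := ((PySem.Dict.mk t).get? "country").getD ""
      if PySem.Set.contains temp name then d.modify name 0 (· + 1) else d) d0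
  d.items

-- ===== PORT B =====
def getCountryTweetCount_alt (payload : List (String × List String)) (tweet_list : List (List (String × String))) (country_set : List String) : List (String × Int) :=
  -- names = [tweet['country'] for tweet in tweet_list]
  let names : List String := tweet_list.map (fun t => ((PySem.Dict.mk t).get? "country").getD "")
  -- wanted = set(payload['countries']) or set(country_set)
  let countries : List String := ((PySem.Dict.mk payload).get? "countries").getD []
  let wanted : PySem.Set String :=
    if PySem.Set.ofList countries = [] then PySem.Set.ofList country_set
    else PySem.Set.ofList countries
  -- {c: names.count(c) for c in wanted}
  wanted.map (fun c => (c, (names.count c : Int)))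

-- ===== PRECONDITION & SPEC =====
-- Pre_ = exactly where the Python A returns: payload has key 'countries' and every tweet has key 'country'
-- (otherwise A raises KeyError).
def Pre_getCountryTweetCount (payload : List (String × List String)) (tweet_list : List (List (String × String))) (country_set : List String) : Prop :=
  ((PySem.Dict.mk payload).get? "countries").isSome = true ∧
  ∀ t ∈ tweet_list, ((PySem.Dict.mk t).get? "country").isSome = true
instance (payload : List (String × List String)) (tweet_list : List (List (String × String))) (country_set : List String) : Decidable (Pre_getCountryTweetCount payload tweet_list country_set) := by unfold Pre_getCountryTweetCount; infer_instance
def pvWitness_getCountryTweetCount : (List (String × List String)) × (List (List (String × String))) × List String :=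
  ([("countries", ["US", "IN"])], [[("country", "US")], [("country", "FR")], [("country", "US")]], ["FR"])

def Spec_getCountryTweetCount (payload : List (String × List String)) (tweet_list : List (List (String × String))) (country_set : List String) (out : List (String × Int)) : Prop := out = getCountryTweetCount_alt payload tweet_list country_set
instance (payload : List (String × List String)) (tweet_list : List (List (String × String))) (country_set : List String) (out : List (String × Int)) : Decidable (Spec_getCountryTweetCount payload tweet_list country_set out) := by unfold Spec_getCountryTweetCount; infer_instance

-- ===== CLAIM (what is proved, stated in full; the proofs are below) =====
def Claim_equal_getCountryTweetCount : Prop := ∀ (payload : List (String × List String)) (tweet_list : List (List (String × String))) (country_set : List String), Dom_getCountryTweetCount payload tweet_list country_set → Pre_getCountryTweetCount payload tweet_list country_set → Spec_getCountryTweetCount payload tweet_list country_set (getCountryTweetCount payload tweet_list country_set)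

-- ===== LEMMAS AND PROOFS =====

-- two dicts with the same items list are the same dict
lemma pvDictEqOfItems {κ ν : Type} (d : PySem.Dict κ ν) (l : List (κ × ν)) (h : d.items = l) :
    d = PySem.Dict.mk l := by cases d; cases h; rfl

-- invariant of A's counting loop: starting from the dict {c ↦ f c | c ∈ temp} (temp duplicate-free),
-- the membership-filtered increment loop over `names` yields {c ↦ f c + names.count c | c ∈ temp}
lemma pvLoopA (temp : List String) (hnd : temp.Nodup) (names : List String) :
    ∀ f : String → Int,
    (names.foldl (fun d n => if PySem.Set.contains temp n then d.modify n 0 (· + 1) else d)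
        (PySem.Dict.mk (temp.map (fun c => (c, f c))))).items
      = temp.map (fun c => (c, f c + (names.count c : Int))) := by
  induction names with
  | nil => intro f; simp
  | cons n ns ih =>
    intro f
    simp only [List.foldl_cons]
    by_cases hm : n ∈ temp
    · have hc : PySem.Set.contains temp n = true := by
        simp [PySem.Set.contains, hm]
      rw [hc, if_pos rfl]
      have hkeys : (PySem.Dict.mk (temp.map (fun c => (c, f c)))).keys.Nodup := by
        simpa [PySem.Dict.keys_mk, List.map_map, Function.comp_def] using hnd
      have hmem : (n, f n) ∈ temp.map (fun c => (c, f c)) := List.mem_map_of_mem hm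
      have hget : (PySem.Dict.mk (temp.map (fun c => (c, f c)))).getD n 0 = f n :=
        PySem.Dict.getD_of_mem_items _ hmem hkeys 0
      have hcont : (PySem.Dict.mk (temp.map (fun c => (c, f c)))).contains n = true := by
        rw [PySem.Dict.contains_mk, List.any_eq_true]
        exact ⟨(n, f n), List.mem_map_of_mem hm, by simp⟩
      have hmod : (PySem.Dict.mk (temp.map (fun c => (c, f c)))).modify n 0 (· + 1)
          = PySem.Dict.mk (temp.map (fun c => (c, if c = n then f c + 1 else f c))) := by
        apply pvDictEqOfItems
        rw [PySem.Dict.modify, hget, PySem.Dict.items_insert_of_contains _ _ hcont]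
        simp only [List.map_map]
        apply List.map_congr_left
        intro c hcmem
        by_cases hcn : c = n
        · subst hcn; simp
        · simp [Function.comp, hcn]
      rw [hmod, ih (fun c => if c = n then f c + 1 else f c)]
      apply List.map_congr_left
      intro c hcmem
      by_cases hcn : c = n
      · subst hcn; simp; ring
      · simp [hcn, Ne.symm hcn]
    · have hc : PySem.Set.contains temp n = false := by
        simp [PySem.Set.contains]; exact fun h => hm h
      rw [hc]
      simp only [Bool.false_eq_true, if_false]
      rw [ih f]
      apply List.map_congr_left
      intro c hcmem
      have hne : n ≠ c := fun h => hm (h ▸ hcmem)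
      simp [hne]

-- A's zero-initialisation loop builds exactly the dict {c ↦ 0 | c ∈ temp}
lemma pvInitA (temp : List String) (hnd : temp.Nodup) :
    (temp.foldl (fun d c => d.insert c (0 : Int)) PySem.Dict.empty)
      = PySem.Dict.mk (temp.map (fun c => (c, (0 : Int)))) := by
  apply pvDictEqOfItems
  have h := PySem.Dict.items_foldl_insert_fresh temp (fun a => a) (fun _ => (0 : Int))
      PySem.Dict.empty (by intro a _; simp) (by simpa using hnd)
  simpa using h

-- set(a::l) is never the empty set
lemma pvOfListConsNe (a : String) (l : List String) : PySem.Set.ofList (a :: l) ≠ [] := by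
  have key : ∀ (m : List String) (s : PySem.Set String), s ≠ [] → m.foldl PySem.Set.add s ≠ [] := by
    intro m
    induction m with
    | nil => intro s hs; simpa using hs
    | cons x xs ih =>
      intro s hs
      simp only [List.foldl_cons]
      apply ih
      unfold PySem.Set.add
      split
      · exact hs
      · simp
  rw [PySem.Set.ofList_eq_foldl]
  simp only [List.foldl_cons]
  apply key
  unfold PySem.Set.add
  simp [PySem.Set.contains]

theorem pv_main (payload : List (String × List String)) (tweet_list : List (List (String × String))) (country_set : List String) :
    getCountryTweetCount payload tweet_list country_set
      = getCountryTweetCount_alt payload tweet_list country_set := by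
  simp only [getCountryTweetCount, getCountryTweetCount_alt]
  set countries := ((PySem.Dict.mk payload).get? "countries").getD [] with hcs
  have htemp : (if countries.length > 0 then countries.foldl PySem.Set.add PySem.Set.empty
        else PySem.Set.ofList country_set)
      = (if PySem.Set.ofList countries = [] then PySem.Set.ofList country_set
         else PySem.Set.ofList countries) := by
    cases countries with
    | nil => simp
    | cons a l =>
      rw [if_pos (by simp), if_neg (pvOfListConsNe a l), PySem.Set.ofList_eq_foldl]
      rfl
  rw [htemp]
  set temp : PySem.Set String :=
    (if PySem.Set.ofList countries = [] then PySem.Set.ofList country_set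
     else PySem.Set.ofList countries) with htdef
  have hnd : temp.Nodup := by
    rw [htdef]; split <;> exact PySem.Set.nodup_ofList _
  set g : List (String × String) → String := fun t => ((PySem.Dict.mk t).get? "country").getD "" with hg
  set names := tweet_list.map g with hnames
  have hA := pvLoopA temp hnd names (fun _ => (0 : Int))
  rw [hnames, List.foldl_map] at hA
  rw [pvInitA temp hnd, hA]
  apply List.map_congr_left
  intro c hcmem
  simp [hnames]

-- ===== VERDICT (by name: the statement is the Claim_ definition above) =====
theorem getCountryTweetCount_spec : Claim_equal_getCountryTweetCount := by
  intro payload tweet_list country_set _ _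
  unfold Spec_getCountryTweetCount
  exact pv_main payload tweet_list country_set
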